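-- pv_equiv track=rewrite | github.com/silence102/Algorithm-Study | 프로그래머스/0/120842. 2차원으로 만들기/2차원으로 만들기.py | solution
-- ===== SOURCE A (Python) =====
-- def solution(num_list, n):
--     cnt = 0
--     numbers = []
--     answer = []
--     for i in range(len(num_list)):
--         numbers.append(num_list[i])
--         cnt += 1
--         if cnt == n:
--             answer.append(numbers)
--             cnt = 0
--             numbers = []
--     return answer
-- ===== SOURCE B (Python) =====
-- def solution(num_list, n):
--     if n <= 0:
--         return []
--     stop = len(num_list) // n * n
--     return [num_list[i:i+n] for i in range(0, stop, n)]
-- ===== Notes on version B (the rewrite author's own statement) =====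
-- stated objective: idiomatic
-- what changed: B slices at chunk boundaries (range(0, len//n*n, n) with C-level list slicing) instead of A's element-by-element accumulation with a counter and flush-on-full buffer.
import Mathlib
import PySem

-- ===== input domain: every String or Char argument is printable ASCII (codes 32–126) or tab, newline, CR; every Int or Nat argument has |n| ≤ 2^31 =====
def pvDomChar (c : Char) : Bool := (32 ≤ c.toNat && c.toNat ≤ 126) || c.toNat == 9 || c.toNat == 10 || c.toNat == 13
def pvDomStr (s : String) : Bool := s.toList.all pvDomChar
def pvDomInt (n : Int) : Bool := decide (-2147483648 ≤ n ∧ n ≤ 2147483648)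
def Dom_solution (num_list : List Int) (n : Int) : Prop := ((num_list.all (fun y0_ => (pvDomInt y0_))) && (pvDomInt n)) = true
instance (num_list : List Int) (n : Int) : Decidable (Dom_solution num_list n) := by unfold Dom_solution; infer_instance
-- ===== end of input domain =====

-- B reshapes by slicing at chunk boundaries instead of A's counter-and-buffer accumulation (idiomatic; same cost).

-- ===== PORT A =====
-- the body of A's for-loop: append the element, bump the counter, flush a full row
def solutionStep (n : Int) (st : Int × List Int × List (List Int)) (x : Int) :
    Int × List Int × List (List Int) :=
  let numbers := st.2.1 ++ [x]
  let cnt := st.1 + 1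
  if cnt = n then (0, ([] : List Int), st.2.2 ++ [numbers]) else (cnt, numbers, st.2.2)

def solution (num_list : List Int) (n : Int) : List (List Int) :=
  ((PySem.List.pyRange 0 (num_list.length : Int) 1).foldl
    (fun st i => solutionStep n st (PySem.List.pyGetD num_list i 0))
    (0, ([] : List Int), ([] : List (List Int)))).2.2

-- ===== PORT B =====
def solution_alt (num_list : List Int) (n : Int) : List (List Int) :=
  if n ≤ 0 then []
  else
    (PySem.List.pyRange 0 (PySem.Int.floordiv (num_list.length : Int) n * n) n).map
      (fun i => PySem.List.slice num_list (some i) (some (i + n)))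

-- ===== PRECONDITION & SPEC =====
def Spec_solution (num_list : List Int) (n : Int) (out : List (List Int)) : Prop := out = solution_alt num_list n
instance (num_list : List Int) (n : Int) (out : List (List Int)) : Decidable (Spec_solution num_list n out) := by unfold Spec_solution; infer_instance

-- ===== CLAIM (what is proved, stated in full; the proofs are below) =====
def Claim_equal_solution : Prop := ∀ (num_list : List Int) (n : Int), Dom_solution num_list n → Spec_solution num_list n (solution num_list n)

-- ===== LEMMAS AND PROOFS =====

-- proof-side characterisation: rows of m, trailing partial row dropped
def chunks (m : Nat) (xs : List Int) : List (List Int) :=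
  if _h : 0 < m ∧ m ≤ xs.length then xs.take m :: chunks m (xs.drop m) else []
termination_by xs.length
decreasing_by simp only [List.length_drop]; omega

-- with a non-positive n, A's flush never fires: the answer list never grows
lemma aloop_nonpos (n : Int) (hn : n ≤ 0) :
    ∀ (xs buf : List Int) (acc : List (List Int)) (c : Int), 0 ≤ c →
      (xs.foldl (solutionStep n) (c, buf, acc)).2.2 = acc := by
  intro xs
  induction xs with
  | nil => intro buf acc c _; rfl
  | cons x xs ih =>
    intro buf acc c hc
    have hne : ¬ (c + 1 = n) := by omega
    simp only [List.foldl_cons, solutionStep, hne, if_false]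
    exact ih _ _ _ (by omega)

-- A's loop invariant for positive n: partial buffer carried, answer = chunks of buffer ++ rest
lemma aloop_pos (n : Int) (m : Nat) (hn : n = (m : Int)) (hm : 0 < m) :
    ∀ (xs buf : List Int) (acc : List (List Int)), buf.length < m →
      (xs.foldl (solutionStep n) ((buf.length : Int), buf, acc)).2.2 = acc ++ chunks m (buf ++ xs) := by
  intro xs
  induction xs with
  | nil =>
    intro buf acc hb
    rw [chunks]
    simp [Nat.not_le.mpr hb]
  | cons x xs ih =>
    intro buf acc hb
    by_cases hc : (buf.length : Int) + 1 = n
    · have hlen : (buf ++ [x]).length = m := by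
        simp only [List.length_append, List.length_cons, List.length_nil]
        omega
      simp only [List.foldl_cons, solutionStep, hc, if_true]
      have h0 : (0 : Int) = ((([] : List Int)).length : Int) := by simp
      rw [h0, ih [] (acc ++ [buf ++ [x]]) hm]
      simp only [List.nil_append]
      have hsplit : buf ++ x :: xs = (buf ++ [x]) ++ xs := by simp
      have hcond : 0 < m ∧ m ≤ ((buf ++ [x]) ++ xs).length := by
        constructor
        · exact hm
        · rw [List.length_append, hlen]; omega
      conv_rhs => rw [hsplit, chunks]
      rw [dif_pos hcond, List.take_left' hlen, List.drop_left' hlen]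
      simp
    · have hlt : (buf ++ [x]).length < m := by
        simp only [List.length_append, List.length_cons, List.length_nil]
        omega
      simp only [List.foldl_cons, solutionStep, hc, if_false]
      have hcast : (buf.length : Int) + 1 = (((buf ++ [x]).length : Nat) : Int) := by
        simp
      rw [hcast, ih (buf ++ [x]) acc hlt]
      simp

-- chunks as a map over chunk indices
lemma chunks_eq_map (m : Nat) (hm : 0 < m) :
    ∀ (N : Nat) (xs : List Int), xs.length ≤ N →
      chunks m xs = (List.range (xs.length / m)).map (fun k => (xs.drop (m * k)).take m) := by
  intro N
  induction N with
  | zero =>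
    intro xs hx
    have hx0 : xs.length = 0 := by omega
    rw [chunks]
    have : ¬ (0 < m ∧ m ≤ xs.length) := by omega
    rw [dif_neg this]
    rw [hx0, Nat.div_eq_of_lt hm]
    simp
  | succ N ih =>
    intro xs hx
    by_cases hle : m ≤ xs.length
    · rw [chunks, dif_pos ⟨hm, hle⟩]
      have hdroplen : (xs.drop m).length = xs.length - m := by simp
      have hdiv : xs.length / m = (xs.length - m) / m + 1 := Nat.div_eq_sub_div hm hle
      rw [ih (xs.drop m) (by omega)]
      rw [hdiv, List.range_succ_eq_map, List.map_cons, List.map_map]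
      rw [hdroplen]
      congr 1
      refine List.map_congr_left ?_
      intro k hk
      simp only [Function.comp_apply, List.drop_drop]
      rw [Nat.mul_succ, Nat.add_comm]
    · rw [chunks]
      have : ¬ (0 < m ∧ m ≤ xs.length) := by omega
      rw [dif_neg this, Nat.div_eq_of_lt (by omega)]
      simp

-- B for positive n equals the same map over chunk indices
lemma alt_pos (num_list : List Int) (n : Int) (m : Nat) (hn : n = (m : Int)) (hm : 0 < m) :
    solution_alt num_list n =
      (List.range (num_list.length / m)).map (fun k => (num_list.drop (m * k)).take m) := by
  have hnpos : ¬ (n ≤ 0) := by omega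
  unfold solution_alt
  rw [if_neg hnpos]
  subst hn
  rw [PySem.Int.floordiv_natCast]
  set q : Nat := num_list.length / m with hq
  have hstop : ((q : Int)) * (m : Int) = ((q * m : Nat) : Int) := by push_cast; ring
  rw [hstop, PySem.List.pyRange_of_pos 0 ((q * m : Nat) : Int) (by exact_mod_cast hm)]
  have hcount : (if (0 : Int) < ((q * m : Nat) : Int)
      then ((((q * m : Nat) : Int) - 0 + (m : Int) - 1) / (m : Int)).toNat else 0) = q := by
    by_cases hq0 : q = 0
    · simp [hq0]
    · have hqm : 0 < q * m := Nat.mul_pos (Nat.pos_of_ne_zero hq0) hm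
      rw [if_pos (by exact_mod_cast hqm)]
      have harith : (((q * m : Nat) : Int) - 0 + (m : Int) - 1) = (((q * m + (m - 1) : Nat)) : Int) := by
        push_cast [Nat.cast_sub (by omega : 1 ≤ m)]
        ring
      rw [harith]
      have : (((q * m + (m - 1) : Nat) : Int)) / ((m : Nat) : Int) = (((q * m + (m - 1)) / m : Nat) : Int) := by
        exact_mod_cast (Int.natCast_div (q * m + (m - 1)) m).symm
      rw [this]
      have : (q * m + (m - 1)) / m = q := by
        rw [Nat.add_comm, Nat.add_mul_div_right _ _ hm, Nat.div_eq_of_lt (by omega)]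
        omega
      rw [this]
      simp
  rw [hcount, List.map_map]
  apply List.map_congr_left
  intro k _
  simp only [Function.comp]
  have h1 : (0 : Int) + (m : Int) * (k : Int) = ((m * k : Nat) : Int) := by push_cast; ring
  rw [h1, PySem.List.slice_natCast_add]

-- ===== VERDICT (by name: the statement is the Claim_ definition above) =====
theorem solution_spec : Claim_equal_solution := by
  intro num_list n _
  unfold Spec_solution
  unfold solution
  rw [PySem.List.foldl_pyRange_zero_pyGetD' num_list 0 (solutionStep n)
        (0, ([] : List Int), ([] : List (List Int)))]
  by_cases hn : n ≤ 0
  · rw [aloop_nonpos n hn num_list [] [] 0 le_rfl]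
    unfold solution_alt
    rw [if_pos hn]
  · have hm : 0 < n.toNat := by omega
    have hcast : n = (n.toNat : Int) := by omega
    have h0 : (0 : Int) = ((([] : List Int)).length : Int) := by simp
    rw [h0, aloop_pos n n.toNat hcast hm num_list [] [] (by simpa using hm)]
    simp only [List.nil_append]
    rw [alt_pos num_list n n.toNat hcast hm,
        chunks_eq_map n.toNat hm num_list.length num_list le_rfl]
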